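-- pv_equiv track=rewrite | github.com/Malhar-Bhensjariya/ML_Project | backend/flask/package/topic_recommendation/routes.py | remove_trailing_duplicates
-- ===== SOURCE A (Python) =====
-- def remove_trailing_duplicates(lst):
--     if not lst:
--         return lst
--
--     last_value = lst[-1]
--     while lst and lst[-1] == last_value:
--         lst.pop()
--     lst.append(last_value)
--     return lst
-- ===== SOURCE B (Python) =====
-- def remove_trailing_duplicates(lst):
--     if not lst:
--         return lst
--     last = lst[-1]
--     i = len(lst)
--     while i > 0 and lst[i - 1] == last:
--         i -= 1
--     del lst[i + 1:]
--     return lst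
-- ===== Notes on version B (the rewrite author's own statement) =====
-- stated objective: alternative
-- what changed: B finds the start index of the trailing run with a backward index scan and removes the duplicates with one slice deletion, instead of A's pop-loop that also removes the kept element and appends it back.
import Mathlib
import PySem

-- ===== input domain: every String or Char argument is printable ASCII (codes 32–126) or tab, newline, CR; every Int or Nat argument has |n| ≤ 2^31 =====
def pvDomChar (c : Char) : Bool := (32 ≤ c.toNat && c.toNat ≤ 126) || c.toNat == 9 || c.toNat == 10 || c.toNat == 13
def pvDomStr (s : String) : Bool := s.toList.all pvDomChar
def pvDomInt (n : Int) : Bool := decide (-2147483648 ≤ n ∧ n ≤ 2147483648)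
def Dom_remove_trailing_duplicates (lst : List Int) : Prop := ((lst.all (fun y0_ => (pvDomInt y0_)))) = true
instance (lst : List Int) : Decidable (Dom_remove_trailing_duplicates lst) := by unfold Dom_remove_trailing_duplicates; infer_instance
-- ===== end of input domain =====

-- B collapses the trailing run via a backward index scan plus one slice deletion instead of
-- A's pop-loop-and-reappend; both Pythons mutate lst in place, the equivalence proved here is
-- about the returned value.


-- ===== PORT A =====
-- the while loop: pop from the end while the list is nonempty and its last element equals v
def popLoopA (l : List Int) (v : Int) : List Int :=
  if l ≠ [] ∧ PySem.List.pyGet? l (-1) = some v then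
    popLoopA l.dropLast v
  else l
termination_by l.length
decreasing_by
  rename_i h
  have := h.1
  cases l with
  | nil => simp at this
  | cons a t => simp

def remove_trailing_duplicates (lst : List Int) : List Int :=
  if lst = [] then lst
  else
    match PySem.List.pyGet? lst (-1) with
    | none => []   -- unreachable: lst ≠ []
    | some last_value => popLoopA lst last_value ++ [last_value]

-- ===== PORT B =====
-- the while loop: i -= 1 while i > 0 and lst[i-1] == last
def scanB (lst : List Int) (v : Int) (i : Int) : Int :=
  if i > 0 ∧ PySem.List.pyGet? lst (i - 1) = some v then
    scanB lst v (i - 1)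
  else i
termination_by i.toNat
decreasing_by
  rename_i h
  have := h.1
  omega

def remove_trailing_duplicates_alt (lst : List Int) : List Int :=
  if lst = [] then lst
  else
    match PySem.List.pyGet? lst (-1) with
    | none => []   -- unreachable: lst ≠ []
    | some last =>
      let i := scanB lst last (lst.length : Int)
      -- del lst[i+1:] keeps the first i+1 elements
      lst.take (i + 1).toNat

-- ===== PRECONDITION & SPEC =====
def Spec_remove_trailing_duplicates (lst : List Int) (out : List Int) : Prop := out = remove_trailing_duplicates_alt lst
instance (lst : List Int) (out : List Int) : Decidable (Spec_remove_trailing_duplicates lst out) := by unfold Spec_remove_trailing_duplicates; infer_instance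

-- ===== CLAIM (what is proved, stated in full; the proofs are below) =====
def Claim_equal_remove_trailing_duplicates : Prop := ∀ (lst : List Int), Dom_remove_trailing_duplicates lst → Spec_remove_trailing_duplicates lst (remove_trailing_duplicates lst)

-- ===== LEMMAS AND PROOFS =====

-- A's pop loop removes exactly the trailing run of v: it computes the reverse of
-- dropWhile (· == v) applied to the reversed list.
theorem popLoopA_eq (l : List Int) (v : Int) :
    popLoopA l v = (l.reverse.dropWhile (· == v)).reverse := by
  induction l using popLoopA.induct v with
  | case1 l h ih =>
    rw [popLoopA, if_pos h, ih]
    obtain ⟨hne, hlast⟩ := h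
    rw [PySem.List.pyGet?_neg_one] at hlast
    obtain ⟨t, a, rfl⟩ := (List.eq_nil_or_concat' _).resolve_left hne
    simp at hlast
    subst hlast
    simp
  | case2 l h =>
    rw [popLoopA, if_neg h]
    by_cases hne : l = []
    · subst hne; simp
    · obtain ⟨t, a, rfl⟩ := (List.eq_nil_or_concat' _).resolve_left hne
      have hav : ¬ a = v := by
        intro hav
        exact h ⟨by simp, by rw [PySem.List.pyGet?_neg_one]; simp [hav]⟩
      simp [hav]

-- B's scan starting at j ≤ len stops at the length of dropWhile (· == v) on the reverse of take j.
theorem scanB_eq (lst : List Int) (v : Int) (j : Nat) (hj : j ≤ lst.length) :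
    scanB lst v (j : Int) = (((lst.take j).reverse.dropWhile (· == v)).length : Int) := by
  induction j with
  | zero =>
    rw [scanB, if_neg (by simp)]
    simp
  | succ n ih =>
    have hn : n < lst.length := by omega
    have htake : (lst.take (n + 1)).reverse = lst[n] :: (lst.take n).reverse := by
      rw [List.take_add_one]
      simp [List.getElem?_eq_getElem hn]
    have hget : PySem.List.pyGet? lst ((n + 1 : Nat) - 1 : Int) = some lst[n] := by
      have : ((n + 1 : Nat) : Int) - 1 = (n : Int) := by push_cast; ring
      rw [this, PySem.List.pyGet?_natCast, List.getElem?_eq_getElem hn]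
    by_cases hv : lst[n] = v
    · rw [scanB, if_pos ⟨by positivity, by rw [hget, hv]⟩]
      have : ((n + 1 : Nat) : Int) - 1 = ((n : Nat) : Int) := by push_cast; ring
      rw [this, ih (by omega), htake]
      simp [List.dropWhile, hv]
    · rw [scanB, if_neg (by
        rintro ⟨-, hc⟩
        rw [hget] at hc
        exact hv (Option.some.inj hc))]
      rw [htake]
      rw [List.dropWhile_cons_of_neg (by simpa using hv)]
      simp [List.length_take, Nat.min_eq_left (Nat.le_of_lt hn)]

theorem remove_trailing_duplicates_spec : Claim_equal_remove_trailing_duplicates := by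
  intro lst _
  unfold Spec_remove_trailing_duplicates remove_trailing_duplicates remove_trailing_duplicates_alt
  by_cases hne : lst = []
  · simp [hne]
  · rw [if_neg hne, if_neg hne]
    obtain ⟨t, a, rfl⟩ := (List.eq_nil_or_concat' _).resolve_left hne
    rw [PySem.List.pyGet?_neg_one_append_singleton]
    dsimp only
    rw [popLoopA_eq, scanB_eq _ _ _ (le_refl _), List.take_length]
    -- decompose the reversed list into the run of a's and the rest
    set r := (t ++ [a]).reverse with hr
    have hsplit : r = r.takeWhile (· == a) ++ r.dropWhile (· == a) :=
      (List.takeWhile_append_dropWhile).symm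
    have hrhead : r = a :: t.reverse := by simp [hr]
    have htw_ne : r.takeWhile (· == a) ≠ [] := by
      rw [hrhead]; simp [List.takeWhile]
    have htw_all : ∀ x ∈ r.takeWhile (· == a), x = a := by
      intro x hx
      have := List.mem_takeWhile_imp hx
      simpa using this
    -- the original list is (dropWhile part).reverse ++ (takeWhile part).reverse
    have hl : t ++ [a] = (r.dropWhile (· == a)).reverse ++ (r.takeWhile (· == a)).reverse := by
      have : r.reverse = t ++ [a] := by simp [hr]
      rw [← this]
      conv_lhs => rw [hsplit]
      rw [List.reverse_append]
    set d := r.dropWhile (· == a) with hd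
    set w := r.takeWhile (· == a) with hw
    have hcast : ((((d.length : Nat) : Int) + 1).toNat) = d.length + 1 := by omega
    rw [hcast, hl, List.take_append]
    have hlen : d.length + 1 - (d.reverse).length = 1 := by simp
    rw [List.length_reverse] at *
    have : List.take (d.length + 1 - d.length) w.reverse = [a] := by
      have h1 : d.length + 1 - d.length = 1 := by omega
      rw [h1]
      obtain ⟨y, ys, hys⟩ := List.exists_cons_of_ne_nil (by simpa using htw_ne : w ≠ [])
      obtain ⟨t', a', hys'⟩ := (List.eq_nil_or_concat' w).resolve_left (by simpa using htw_ne)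
      rw [hys']
      have ha' : a' = a := htw_all a' (by rw [hys']; simp)
      simp [ha']
    rw [this]
    simp
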